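-- pv_equiv track=rewrite | github.com/iclaserplasma/2019_TA2_HRR_AnalysisCode | ta2_hrr_analysisCode/ESpecAnalysis.py | findFirstLastTruth
-- ===== SOURCE A (Python) =====
-- def findFirstLastTruth(AboveFWHM):
--     j=0
--     while AboveFWHM[j] == 0:
--         j += 1
--     first = j
--     j=1
--     while AboveFWHM[-j] == 0:
--         j += 1
--     last = j
--     return first, last
-- ===== SOURCE B (Python) =====
-- def findFirstLastTruth(AboveFWHM):
--     first = None
--     last = None
--     for i, x in enumerate(AboveFWHM):
--         if x != 0:
--             if first is None:
--                 first = i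
--             last = i
--     if first is None:
--         raise IndexError("list index out of range")
--     return first, len(AboveFWHM) - last
-- ===== Notes on version B (the rewrite author's own statement) =====
-- stated objective: alternative
-- what changed: Replaces A's two directional while-scans (forward from 0, backward via negative indexing) by one forward enumerate pass that tracks both the first and the last nonzero index, returning (first, len - last).
import Mathlib
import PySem

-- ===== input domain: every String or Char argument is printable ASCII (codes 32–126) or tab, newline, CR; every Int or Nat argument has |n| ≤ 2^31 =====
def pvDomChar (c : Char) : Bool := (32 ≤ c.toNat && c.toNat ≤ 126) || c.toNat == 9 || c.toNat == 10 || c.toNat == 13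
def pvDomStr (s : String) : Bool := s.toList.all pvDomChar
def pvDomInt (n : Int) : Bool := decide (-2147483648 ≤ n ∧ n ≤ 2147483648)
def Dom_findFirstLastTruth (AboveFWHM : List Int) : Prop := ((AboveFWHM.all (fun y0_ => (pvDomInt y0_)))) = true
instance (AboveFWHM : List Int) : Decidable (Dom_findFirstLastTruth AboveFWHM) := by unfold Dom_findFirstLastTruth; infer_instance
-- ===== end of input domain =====

-- B replaces A's two directional while-scans by one forward pass tracking both boundary indices (objective: alternative decomposition, same cost).
-- Pre_ excludes empty/all-zero lists, on which both A and B raise IndexError.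

-- ===== PORT A =====
-- forward while loop: 'j=0; while AboveFWHM[j]==0: j+=1'; scanning the list structurally
-- with counter j is exact on inputs with a nonzero element (outside, Python raises IndexError).
def pvScanA (xs : List Int) (j : Nat) : Nat :=
  match xs with
  | [] => j
  | x :: rest => if x == 0 then pvScanA rest (j + 1) else j

def findFirstLastTruth (AboveFWHM : List Int) : Int × Int :=
  -- first loop over AboveFWHM from index 0; second loop reads AboveFWHM[-j], i.e. walks the
  -- reversed list, with j starting at 1.
  let first : Nat := pvScanA AboveFWHM 0
  let last : Nat := pvScanA AboveFWHM.reverse 1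
  ((first : Int), (last : Int))

-- ===== PORT B =====
def pvStepB (st : Option Int × Int) (p : Int × Int) : Option Int × Int :=
  if p.2 ≠ 0 then
    ((match st.1 with | none => some p.1 | some f => some f), p.1)
  else st

def findFirstLastTruth_alt (AboveFWHM : List Int) : Int × Int :=
  let st := (PySem.List.enumerate AboveFWHM).foldl pvStepB (none, 0)
  match st.1 with
  | none => (0, 0)   -- unreachable inside Pre_ (Python B raises IndexError here)
  | some f => (f, (AboveFWHM.length : Int) - st.2)

-- ===== PRECONDITION & SPEC =====
-- Pre_: the list has a nonzero element; otherwise Python A (and B) raise IndexError.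
def Pre_findFirstLastTruth (AboveFWHM : List Int) : Prop := ∃ x ∈ AboveFWHM, x ≠ 0
instance (AboveFWHM : List Int) : Decidable (Pre_findFirstLastTruth AboveFWHM) := by
  unfold Pre_findFirstLastTruth; infer_instance
def pvWitness_findFirstLastTruth : List Int := [0, 3, 0, 5, 0]

def Spec_findFirstLastTruth (AboveFWHM : List Int) (out : Int × Int) : Prop := out = findFirstLastTruth_alt AboveFWHM
instance (AboveFWHM : List Int) (out : Int × Int) : Decidable (Spec_findFirstLastTruth AboveFWHM out) := by unfold Spec_findFirstLastTruth; infer_instance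

-- ===== CLAIM (what is proved, stated in full; the proofs are below) =====
def Claim_equal_findFirstLastTruth : Prop := ∀ (AboveFWHM : List Int), Dom_findFirstLastTruth AboveFWHM → Pre_findFirstLastTruth AboveFWHM → Spec_findFirstLastTruth AboveFWHM (findFirstLastTruth AboveFWHM)

-- ===== LEMMAS AND PROOFS =====

theorem pvScanA_eq_findIdx (xs : List Int) (j : Nat) :
    pvScanA xs j = j + xs.findIdx (fun x => x ≠ 0) := by
  induction xs generalizing j with
  | nil => simp [pvScanA]
  | cons x rest ih =>
    by_cases hx : x = 0
    · simp only [pvScanA, hx, if_pos, decide_true, ih, List.findIdx_cons, decide_not,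
        decide_eq_true_eq]
      simp
      omega
    · simp [pvScanA, hx, List.findIdx_cons]

-- characterisation of B's fold, by induction from the front
theorem pvFoldB_char (xs : List Int) (k : Int) (st : Option Int × Int) :
    (PySem.List.enumerate xs k).foldl pvStepB st =
      if ∀ x ∈ xs, x = 0 then st
      else (((match st.1 with
              | none => some (k + (xs.findIdx (fun x => x ≠ 0) : Int))
              | some f => some f) : Option Int),
            k + ((xs.length : Int) - 1 - (xs.reverse.findIdx (fun x => x ≠ 0) : Int))) := by
  induction xs generalizing k st with
  | nil => simp [PySem.List.enumerate_nil]
  | cons x rest ih =>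
    rw [PySem.List.enumerate_cons, List.foldl_cons]
    by_cases hx : x = 0
    · -- head is zero: step leaves st unchanged
      have hstep : pvStepB st (k, x) = st := by simp [pvStepB, hx]
      by_cases hr : ∀ y ∈ rest, y = 0
      · have hall : ∀ y ∈ x :: rest, y = 0 := by
          intro y hy; rcases List.mem_cons.mp hy with rfl | hy; exact hx; exact hr y hy
        rw [hstep, ih, if_pos hr, if_pos hall]
      · have hall : ¬ ∀ y ∈ x :: rest, y = 0 := by
          intro h; exact hr (fun y hy => h y (List.mem_cons_of_mem _ hy))
        rw [hstep, ih, if_neg hr, if_neg hall]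
        have hmem : ∃ y ∈ rest.reverse, (fun x => decide (x ≠ 0)) y = true := by
          push_neg at hr
          obtain ⟨y, hy, hy0⟩ := hr
          exact ⟨y, List.mem_reverse.mpr hy, by simp [hy0]⟩
        have hlen : rest.reverse.findIdx (fun x => x ≠ 0) < rest.length := by
          simpa using List.findIdx_lt_length_of_exists hmem
        have hfi : (x :: rest).findIdx (fun x => x ≠ 0) =
            rest.findIdx (fun x => x ≠ 0) + 1 := by
          simp [List.findIdx_cons, hx]
        have hrev : (x :: rest).reverse.findIdx (fun x => x ≠ 0) =
            rest.reverse.findIdx (fun x => x ≠ 0) := by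
          rw [List.reverse_cons, List.findIdx_append, if_pos (by simpa using hlen)]
        refine Prod.ext ?_ ?_
        · cases hst : st.1 with
          | none => simp only [hst]; rw [hfi]; push_cast; ring
          | some f => simp only [hst]
        · simp only [hrev, List.length_cons]
          push_cast
          omega
    · -- head nonzero: step sets first (if unset) and last to k
      have hstep : pvStepB st (k, x) =
          ((match st.1 with | none => some k | some f => some f), k) := by
        simp [pvStepB, hx]
      have hall : ¬ ∀ y ∈ x :: rest, y = 0 := by
        intro h; exact hx (h x (by simp))
      rw [hstep, ih, if_neg hall]
      have hfi : (x :: rest).findIdx (fun x => x ≠ 0) = 0 := by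
        simp [List.findIdx_cons, hx]
      by_cases hr : ∀ y ∈ rest, y = 0
      · rw [if_pos hr]
        have hnolt : ¬ rest.reverse.findIdx (fun x => x ≠ 0) < rest.reverse.length := by
          intro hlt
          have hp := List.findIdx_getElem (w := hlt)
          simp only [decide_eq_true_eq] at hp
          exact hp (hr _ (List.mem_reverse.mp (rest.reverse.getElem_mem hlt)))
        have hrev : (x :: rest).reverse.findIdx (fun x => x ≠ 0) = rest.length := by
          rw [List.reverse_cons, List.findIdx_append, if_neg hnolt]
          simp [List.findIdx_cons, hx]
        refine Prod.ext ?_ ?_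
        · cases hst : st.1 with
          | none => simp only [hst]; rw [hfi]; simp
          | some f => simp only [hst]
        · simp only [hrev, List.length_cons]
          push_cast
          ring
      · rw [if_neg hr]
        have hmem : ∃ y ∈ rest.reverse, (fun x => decide (x ≠ 0)) y = true := by
          push_neg at hr
          obtain ⟨y, hy, hy0⟩ := hr
          exact ⟨y, List.mem_reverse.mpr hy, by simp [hy0]⟩
        have hlt : rest.reverse.findIdx (fun x => x ≠ 0) < rest.length := by
          simpa using List.findIdx_lt_length_of_exists hmem
        have hrev : (x :: rest).reverse.findIdx (fun x => x ≠ 0) =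
            rest.reverse.findIdx (fun x => x ≠ 0) := by
          rw [List.reverse_cons, List.findIdx_append, if_pos (by simpa using hlt)]
        refine Prod.ext ?_ ?_
        · cases hst : st.1 with
          | none => simp only [hst]; rw [hfi]; simp
          | some f => simp only [hst]
        · simp only [hrev, List.length_cons]
          push_cast
          omega

-- ===== VERDICT (by name: the statement is the Claim_ definition above) =====
theorem findFirstLastTruth_spec : Claim_equal_findFirstLastTruth := by
  intro xs _ hpre
  obtain ⟨y, hy, hy0⟩ := hpre
  have hall : ¬ ∀ x ∈ xs, x = 0 := fun h => hy0 (h y hy)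
  unfold Spec_findFirstLastTruth findFirstLastTruth findFirstLastTruth_alt
  rw [pvFoldB_char, if_neg hall]
  have h1 := pvScanA_eq_findIdx xs 0
  have h2 := pvScanA_eq_findIdx xs.reverse 1
  have hrlt : xs.reverse.findIdx (fun x => x ≠ 0) < xs.length := by
    have hmem : ∃ z ∈ xs.reverse, (fun x => decide (x ≠ 0)) z = true :=
      ⟨y, List.mem_reverse.mpr hy, by simp [hy0]⟩
    simpa using List.findIdx_lt_length_of_exists hmem
  simp only [h1, h2]
  refine Prod.ext ?_ ?_
  · simp
  · simp
    push_cast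
    omega
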